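-- pv_equiv track=rewrite | github.com/deepomicslab/INVAS | scripts/full_pipe/generate_final_gtf.py | split_transcripts_by_connections
-- ===== SOURCE A (Python) =====
-- from collections import defaultdict
--
-- def exon_overlap(exon1, exon2):
--     start1, end1 = exon1
--     start2, end2 = exon2
--     return not (end1 < start2 or start1 > end2)
--
-- def split_transcripts_by_connections(inversion_connections, transcripts):
--     new_transcripts = defaultdict(list)
--     updated_transcripts = defaultdict(list)
--
--     for (chrom, inv_start, inv_end), (relation, exon1, exon2) in inversion_connections.items():
--         for transcript_id, exons in transcripts.items():
--             # 检查前后连接是否属于同一个转录本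
--             if exon1 in exons and exon2 in exons:
--                 # 将 inversion.exon 从该转录本中剥离，生成新的转录本
--                 new_transcripts[transcript_id].append((chrom, inv_start, inv_end, "-", exons))
--                 # 剩余的部分保留在原转录本中
--                 updated_transcripts[transcript_id] = [
--                     e for e in exons if not exon_overlap((e[1], e[2]), (inv_start, inv_end))
--                 ]
--     return new_transcripts, updated_transcripts
-- ===== SOURCE B (Python) =====
-- def split_transcripts_by_connections(inversion_connections, transcripts):
--     # Index each exon to the ordered list of transcript ids containing it,
--     # so each inversion only visits the transcripts that can match.
--     index = {}
--     for transcript_id, exons in transcripts.items():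
--         for exon in dict.fromkeys(exons):
--             index.setdefault(exon, []).append(transcript_id)
--
--     new_transcripts = {}
--     updated_transcripts = {}
--     for (chrom, inv_start, inv_end), (relation, exon1, exon2) in inversion_connections.items():
--         ids2 = set(index.get(exon2, ()))
--         for transcript_id in index.get(exon1, ()):
--             if transcript_id in ids2:
--                 exons = transcripts[transcript_id]
--                 new_transcripts.setdefault(transcript_id, []).append(
--                     (chrom, inv_start, inv_end, "-", exons))
--                 updated_transcripts[transcript_id] = [
--                     e for e in exons if e[2] < inv_start or e[1] > inv_end
--                 ]
--     return new_transcripts, updated_transcripts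
-- ===== Notes on version B (the rewrite author's own statement) =====
-- stated objective: faster
-- what changed: Instead of scanning every transcript (and its exon list twice) for every inversion, B builds an exon->transcript-ids index in one pass over the transcripts and for each inversion intersects the id lists of exon1 and exon2, visiting only matching transcripts.
import Mathlib
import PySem

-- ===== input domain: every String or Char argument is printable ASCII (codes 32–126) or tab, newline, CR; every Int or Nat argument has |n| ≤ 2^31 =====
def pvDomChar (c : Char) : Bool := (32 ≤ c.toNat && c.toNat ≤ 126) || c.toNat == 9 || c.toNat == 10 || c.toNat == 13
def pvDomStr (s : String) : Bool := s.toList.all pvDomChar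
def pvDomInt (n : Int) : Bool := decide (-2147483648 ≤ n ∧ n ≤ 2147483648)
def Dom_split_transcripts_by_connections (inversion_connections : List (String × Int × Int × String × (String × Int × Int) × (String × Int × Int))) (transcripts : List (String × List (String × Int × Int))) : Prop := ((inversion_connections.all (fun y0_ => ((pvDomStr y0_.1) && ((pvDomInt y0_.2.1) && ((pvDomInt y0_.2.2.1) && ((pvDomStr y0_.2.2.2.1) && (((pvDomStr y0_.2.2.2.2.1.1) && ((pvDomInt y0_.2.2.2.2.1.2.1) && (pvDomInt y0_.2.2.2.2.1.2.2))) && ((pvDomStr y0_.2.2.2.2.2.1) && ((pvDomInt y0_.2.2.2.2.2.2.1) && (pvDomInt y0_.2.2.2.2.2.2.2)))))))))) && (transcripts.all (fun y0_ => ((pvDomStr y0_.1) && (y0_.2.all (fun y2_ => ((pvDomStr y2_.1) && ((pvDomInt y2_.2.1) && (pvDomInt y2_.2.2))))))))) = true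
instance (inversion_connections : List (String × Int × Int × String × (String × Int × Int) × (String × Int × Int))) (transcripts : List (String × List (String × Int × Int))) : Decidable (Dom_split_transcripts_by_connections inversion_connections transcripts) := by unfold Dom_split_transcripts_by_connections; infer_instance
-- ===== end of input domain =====

-- ===== PORT A =====
-- B replaces A's per-inversion scan of all transcripts by an exon->transcript-ids index
-- built once, intersecting the id lists of the two connected exons per inversion (faster).
def exon_overlap (exon1 : Int × Int) (exon2 : Int × Int) : Bool :=
  let (start1, end1) := exon1
  let (start2, end2) := exon2
  !(decide (end1 < start2) || decide (start1 > end2))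

def split_transcripts_by_connections (inversion_connections : List (String × Int × Int × String × (String × Int × Int) × (String × Int × Int))) (transcripts : List (String × List (String × Int × Int))) : (List (String × List (String × Int × Int × String × (List (String × Int × Int))))) × (List (String × List (String × Int × Int))) :=
  let r :=
    inversion_connections.foldl (fun acc c =>
      let (chrom, inv_start, inv_end, _relation, exon1, exon2) := c
      transcripts.foldl (fun acc t =>
        let (transcript_id, exons) := t
        if exon1 ∈ exons ∧ exon2 ∈ exons then
          -- new_transcripts[transcript_id].append(...)  (defaultdict(list))
          (acc.1.modify transcript_id [] (· ++ [(chrom, inv_start, inv_end, "-", exons)]),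
           -- updated_transcripts[transcript_id] = [e for e in exons if not exon_overlap(...)]
           acc.2.insert transcript_id
             (exons.filter (fun e => !(exon_overlap (e.2.1, e.2.2) (inv_start, inv_end)))))
        else acc) acc)
      ((PySem.Dict.empty, PySem.Dict.empty) :
        PySem.Dict String (List (String × Int × Int × String × (List (String × Int × Int)))) ×
        PySem.Dict String (List (String × Int × Int)))
  (r.1.items, r.2.items)

-- ===== PORT B =====
def split_transcripts_by_connections_alt (inversion_connections : List (String × Int × Int × String × (String × Int × Int) × (String × Int × Int))) (transcripts : List (String × List (String × Int × Int))) : (List (String × List (String × Int × Int × String × (List (String × Int × Int))))) × (List (String × List (String × Int × Int))) :=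
  -- index: for each transcript, for each distinct exon (dict.fromkeys), append its id
  let index : PySem.Dict (String × Int × Int) (List String) :=
    transcripts.foldl (fun idx t =>
      (PySem.Set.ofList t.2).foldl (fun idx exon => idx.modify exon [] (· ++ [t.1])) idx)
      PySem.Dict.empty
  let tdict : PySem.Dict String (List (String × Int × Int)) := PySem.Dict.mk transcripts
  let r :=
    inversion_connections.foldl (fun acc c =>
      let (chrom, inv_start, inv_end, _relation, exon1, exon2) := c
      let ids2 : PySem.Set String := PySem.Set.ofList (index.getD exon2 [])
      (index.getD exon1 []).foldl (fun acc transcript_id =>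
        if ids2.contains transcript_id then
          match tdict.get? transcript_id with   -- transcripts[transcript_id]; the id came from the index, so present
          | some exons =>
              (acc.1.modify transcript_id [] (· ++ [(chrom, inv_start, inv_end, "-", exons)]),
               acc.2.insert transcript_id
                 (exons.filter (fun e => decide (e.2.2 < inv_start) || decide (e.2.1 > inv_end))))
          | none => acc
        else acc) acc)
      ((PySem.Dict.empty, PySem.Dict.empty) :
        PySem.Dict String (List (String × Int × Int × String × (List (String × Int × Int)))) ×
        PySem.Dict String (List (String × Int × Int)))
  (r.1.items, r.2.items)

-- ===== PRECONDITION & SPEC =====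
-- Pre_ excludes association lists with duplicate transcript ids: such lists do not represent
-- any Python dict input (transcripts is a dict, so its keys are unique), and behaviour on
-- them is an artefact of the association-list encoding.
def Pre_split_transcripts_by_connections (inversion_connections : List (String × Int × Int × String × (String × Int × Int) × (String × Int × Int))) (transcripts : List (String × List (String × Int × Int))) : Prop :=
  (transcripts.map Prod.fst).Nodup
instance (inversion_connections : List (String × Int × Int × String × (String × Int × Int) × (String × Int × Int))) (transcripts : List (String × List (String × Int × Int))) : Decidable (Pre_split_transcripts_by_connections inversion_connections transcripts) := by unfold Pre_split_transcripts_by_connections; infer_instance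

def pvWitness_split_transcripts_by_connections : (List (String × Int × Int × String × (String × Int × Int) × (String × Int × Int))) × (List (String × List (String × Int × Int))) :=
  ([("chr1", 5, 9, "+", ("chr1", 4, 6), ("chr1", 8, 10))],
   [("t1", [("chr1", 4, 6), ("chr1", 8, 10), ("chr1", 20, 30)]), ("t2", [("chr1", 4, 6)])])

def Spec_split_transcripts_by_connections (inversion_connections : List (String × Int × Int × String × (String × Int × Int) × (String × Int × Int))) (transcripts : List (String × List (String × Int × Int))) (out : (List (String × List (String × Int × Int × String × (List (String × Int × Int))))) × (List (String × List (String × Int × Int)))) : Prop := out = split_transcripts_by_connections_alt inversion_connections transcripts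
instance (inversion_connections : List (String × Int × Int × String × (String × Int × Int) × (String × Int × Int))) (transcripts : List (String × List (String × Int × Int))) (out : (List (String × List (String × Int × Int × String × (List (String × Int × Int))))) × (List (String × List (String × Int × Int)))) : Decidable (Spec_split_transcripts_by_connections inversion_connections transcripts out) := by
  unfold Spec_split_transcripts_by_connections
  letI d1 : DecidableEq (Int × Int × String × List (String × Int × Int)) := instDecidableEqProd
  letI d2 : DecidableEq (String × Int × Int × String × List (String × Int × Int)) := instDecidableEqProd
  letI d3 : DecidableEq (String × List (String × Int × Int × String × List (String × Int × Int))) := instDecidableEqProd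
  letI d4 : DecidableEq (List (String × List (String × Int × Int × String × List (String × Int × Int)))) := instDecidableEqList
  infer_instance

-- ===== CLAIM (what is proved, stated in full; the proofs are below) =====
def Claim_equal_split_transcripts_by_connections : Prop := ∀ (inversion_connections : List (String × Int × Int × String × (String × Int × Int) × (String × Int × Int))) (transcripts : List (String × List (String × Int × Int))), Dom_split_transcripts_by_connections inversion_connections transcripts → Pre_split_transcripts_by_connections inversion_connections transcripts → Spec_split_transcripts_by_connections inversion_connections transcripts (split_transcripts_by_connections inversion_connections transcripts)

-- ===== LEMMAS AND PROOFS =====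

-- two folds with pointwise-equal step functions are equal
theorem pv_foldl_ext {A B : Type} (f g : B → A → B) (h : ∀ acc x, f acc x = g acc x) :
    ∀ (l : List A) (acc : B), l.foldl f acc = l.foldl g acc := by
  intro l
  induction l with
  | nil => intro acc; rfl
  | cons x xs ih => intro acc; simp only [List.foldl_cons, h, ih]

-- an if on a conjunction is two nested ifs
theorem pv_if_and {A : Type} (p q : Prop) [Decidable p] [Decidable q] (x y : A) :
    (if p ∧ q then x else y) = if p then (if q then x else y) else y := by
  by_cases hp : p <;> by_cases hq : q <;> simp [hp, hq]

-- a fold that conditionally applies g is a fold of g over the filtered list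
theorem pv_foldl_filter {A B : Type} (p : A → Prop) [DecidablePred p] (g : B → A → B) :
    ∀ (l : List A) (acc : B),
      l.foldl (fun a x => if p x then g a x else a) acc
        = (l.filter (fun x => decide (p x))).foldl g acc := by
  intro l
  induction l with
  | nil => intro acc; rfl
  | cons x xs ih =>
      intro acc
      by_cases h : p x <;> simp [h, ih]

-- effect of one transcript's inner loop on a bucket of the exon index
theorem pv_bucket_step (tid : String) :
    ∀ (ds : List (String × Int × Int)), ds.Nodup →
      ∀ (idx : PySem.Dict (String × Int × Int) (List String)) (e : String × Int × Int),
      (ds.foldl (fun idx x => idx.modify x [] (· ++ [tid])) idx).getD e [] =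
        idx.getD e [] ++ (if e ∈ ds then [tid] else []) := by
  intro ds
  induction ds with
  | nil => intro _ idx e; simp
  | cons d rest ih =>
      intro hnd idx e
      have hd : d ∉ rest := (List.nodup_cons.mp hnd).1
      have hr : rest.Nodup := (List.nodup_cons.mp hnd).2
      simp only [List.foldl_cons]
      rw [ih hr]
      rw [PySem.Dict.getD_modify]
      by_cases he : e = d
      · subst he; simp [hd]
      · simp [he]

-- the exon index built by B: each bucket lists, in order, the transcripts containing that exon
theorem pv_bucket :
    ∀ (ts : List (String × List (String × Int × Int)))
      (idx : PySem.Dict (String × Int × Int) (List String)) (e : String × Int × Int),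
      (ts.foldl (fun idx t =>
          (PySem.Set.ofList t.2).foldl (fun idx exon => idx.modify exon [] (· ++ [t.1])) idx)
        idx).getD e [] =
      idx.getD e [] ++ (ts.filter (fun t => decide (e ∈ t.2))).map Prod.fst := by
  intro ts
  induction ts with
  | nil => intro idx e; simp
  | cons t rest ih =>
      intro idx e
      simp only [List.foldl_cons]
      rw [ih]
      rw [pv_bucket_step t.1 (PySem.Set.ofList t.2) (PySem.Set.nodup_ofList _) idx e]
      by_cases he : e ∈ t.2
      · simp [he, PySem.Set.mem_ofList]
      · simp [he, PySem.Set.mem_ofList]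

-- lookup in the transcript dict: the unique matching entry
theorem pv_lookup :
    ∀ (ts : List (String × List (String × Int × Int))),
      (ts.map Prod.fst).Nodup → ∀ (t : String × List (String × Int × Int)), t ∈ ts →
      (PySem.Dict.mk ts).get? t.1 = some t.2 := by
  intro ts
  induction ts with
  | nil => intro _ t ht; cases ht
  | cons u rest ih =>
      intro hnd t ht
      obtain ⟨k, v⟩ := u
      rw [PySem.Dict.get?_mk_cons]
      rcases List.mem_cons.mp ht with h | h
      · subst h; simp
      · have hk : k ≠ t.1 := by
          intro he
          exact (List.nodup_cons.mp (by simpa using hnd)).1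
            (he ▸ List.mem_map_of_mem (f := Prod.fst) h)
        simp only [beq_iff_eq, if_neg hk]
        exact ih (List.nodup_cons.mp (by simpa using hnd)).2 t h

-- membership of a transcript id in the exon2 bucket decides exon2-membership, given unique ids
theorem pv_mem_bucket (ts : List (String × List (String × Int × Int)))
    (hnd : (ts.map Prod.fst).Nodup) (t : String × List (String × Int × Int)) (ht : t ∈ ts)
    (e2 : String × Int × Int) :
    t.1 ∈ (ts.filter (fun u => decide (e2 ∈ u.2))).map Prod.fst ↔ e2 ∈ t.2 := by
  constructor
  · intro h
    obtain ⟨u, hu, hfst⟩ := List.mem_map.mp h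
    obtain ⟨hu1, hu2⟩ := List.mem_filter.mp hu
    have : u = t := List.inj_on_of_nodup_map hnd hu1 ht hfst
    subst this
    exact of_decide_eq_true hu2
  · intro h
    exact List.mem_map_of_mem (List.mem_filter.mpr ⟨ht, decide_eq_true h⟩)

-- B's per-inversion loop over the exon1 bucket equals the direct loop over the matching transcripts
theorem pv_inner_eq {A : Type} (ts : List (String × List (String × Int × Int)))
    (hnd : (ts.map Prod.fst).Nodup) (e2 : String × Int × Int)
    (upd : A → String → List (String × Int × Int) → A) :
    ∀ (S : List (String × List (String × Int × Int))), S.Sublist ts → ∀ (acc : A),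
      (S.map Prod.fst).foldl (fun acc tid =>
          if (PySem.Set.ofList ((ts.filter (fun u => decide (e2 ∈ u.2))).map Prod.fst)).contains tid then
            match (PySem.Dict.mk ts).get? tid with
            | some exons => upd acc tid exons
            | none => acc
          else acc) acc
      = S.foldl (fun acc t => if e2 ∈ t.2 then upd acc t.1 t.2 else acc) acc := by
  intro S
  induction S with
  | nil => intro _ acc; rfl
  | cons t S' ih =>
      intro hsub acc
      have ht : t ∈ ts := hsub.subset List.mem_cons_self
      have hS' : S'.Sublist ts := List.sublist_of_cons_sublist hsub
      simp only [List.map_cons, List.foldl_cons]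
      rw [ih hS']
      congr 1
      by_cases h : e2 ∈ t.2
      · have hc : (PySem.Set.ofList ((ts.filter (fun u => decide (e2 ∈ u.2))).map Prod.fst)).contains t.1 = true := by
          rw [PySem.Set.contains_iff, PySem.Set.mem_ofList]
          exact (pv_mem_bucket ts hnd t ht e2).mpr h
        rw [if_pos hc, pv_lookup ts hnd t ht, if_pos h]
      · have hm : t.1 ∉ PySem.Set.ofList ((ts.filter (fun u => decide (e2 ∈ u.2))).map Prod.fst) := by
          rw [PySem.Set.mem_ofList]
          intro hmem
          exact h ((pv_mem_bucket ts hnd t ht e2).mp hmem)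
        have hc : ¬ ((PySem.Set.ofList ((ts.filter (fun u => decide (e2 ∈ u.2))).map Prod.fst)).contains t.1 = true) := by
          rw [PySem.Set.contains_iff]
          exact hm
        rw [if_neg hc, if_neg h]

-- the per-inversion step functions of the two ports agree
theorem pv_step (ts : List (String × List (String × Int × Int)))
    (hpre : (ts.map Prod.fst).Nodup) :
    ∀ (acc : PySem.Dict String (List (String × Int × Int × String × (List (String × Int × Int)))) ×
             PySem.Dict String (List (String × Int × Int)))
      (c : String × Int × Int × String × (String × Int × Int) × (String × Int × Int)),
      (ts.foldl (fun acc t =>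
          if c.2.2.2.2.1 ∈ t.2 ∧ c.2.2.2.2.2 ∈ t.2 then
            (acc.1.modify t.1 [] fun x => x ++ [(c.1, c.2.1, c.2.2.1, "-", t.2)],
             acc.2.insert t.1
               (List.filter (fun e => !exon_overlap (e.2.1, e.2.2) (c.2.1, c.2.2.1)) t.2))
          else acc) acc)
      = (((List.foldl (fun idx t =>
              List.foldl (fun idx exon => idx.modify exon [] fun x => x ++ [t.1]) idx
                (PySem.Set.ofList t.2)) PySem.Dict.empty ts).getD c.2.2.2.2.1 []).foldl
          (fun acc transcript_id =>
            if (PySem.Set.ofList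
                  ((List.foldl (fun idx t =>
                      List.foldl (fun idx exon => idx.modify exon [] fun x => x ++ [t.1]) idx
                        (PySem.Set.ofList t.2)) PySem.Dict.empty ts).getD c.2.2.2.2.2 [])).contains
                transcript_id = true then
              match (PySem.Dict.mk ts).get? transcript_id with
              | some exons =>
                  (acc.1.modify transcript_id [] fun x => x ++ [(c.1, c.2.1, c.2.2.1, "-", exons)],
                   acc.2.insert transcript_id
                     (List.filter (fun e => decide (e.2.2 < c.2.1) || decide (e.2.1 > c.2.2.1)) exons))
              | none => acc
            else acc) acc) := by
  intro acc c
  rw [pv_bucket ts PySem.Dict.empty c.2.2.2.2.1, pv_bucket ts PySem.Dict.empty c.2.2.2.2.2]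
  simp only [PySem.Dict.getD_empty, List.nil_append]
  rw [pv_inner_eq ts hpre c.2.2.2.2.2
      (fun acc tid exons =>
        (acc.1.modify tid [] fun x => x ++ [(c.1, c.2.1, c.2.2.1, "-", exons)],
         acc.2.insert tid
           (List.filter (fun e => decide (e.2.2 < c.2.1) || decide (e.2.1 > c.2.2.1)) exons)))
      (ts.filter (fun u => decide (c.2.2.2.2.1 ∈ u.2))) List.filter_sublist acc]
  simp only [pv_if_and]
  rw [pv_foldl_filter (fun t => c.2.2.2.2.1 ∈ t.2)
      (fun acc t =>
        if c.2.2.2.2.2 ∈ t.2 then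
          (acc.1.modify t.1 [] fun x => x ++ [(c.1, c.2.1, c.2.2.1, "-", t.2)],
           acc.2.insert t.1
             (List.filter (fun e => !exon_overlap (e.2.1, e.2.2) (c.2.1, c.2.2.1)) t.2))
        else acc) ts acc]
  apply pv_foldl_ext
  intro acc' t
  by_cases h : c.2.2.2.2.2 ∈ t.2 <;> simp [h, exon_overlap]

-- ===== VERDICT (by name: the statement is the Claim_ definition above) =====
theorem split_transcripts_by_connections_spec : Claim_equal_split_transcripts_by_connections := by
  intro inv ts _hdom hpre
  unfold Spec_split_transcripts_by_connections
  simp only [split_transcripts_by_connections, split_transcripts_by_connections_alt]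
  rw [pv_foldl_ext _ _ (pv_step ts hpre) inv (PySem.Dict.empty, PySem.Dict.empty)]
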